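-- pv_equiv track=rewrite | github.com/open-aviation/tangram | src/turbulence/decoder_agg/decoder_aggregator.py | clean_callsign
-- ===== SOURCE A (Python) =====
-- def clean_callsign(cumul):
--     i = 0
--     while i < len(cumul):
--         if cumul[i].keys() == {"timestamp", "icao24", "callsign"}:
--             del cumul[i]
--             i -= 1
--         i += 1
--     return cumul
-- ===== SOURCE B (Python) =====
-- def clean_callsign(cumul):
--     # two-pointer in-place compaction: mutates and returns the same list object
--     w = 0
--     for r in range(len(cumul)):
--         if cumul[r].keys() != {"timestamp", "icao24", "callsign"}:
--             cumul[w] = cumul[r]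
--             w += 1
--     del cumul[w:]
--     return cumul
-- ===== Notes on version B (the rewrite author's own statement) =====
-- stated objective: faster
-- what changed: Replaces A's delete-and-rewind while loop (each `del cumul[i]` shifts the whole tail) with a single-pass two-pointer in-place compaction followed by one tail truncation.
import Mathlib
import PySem

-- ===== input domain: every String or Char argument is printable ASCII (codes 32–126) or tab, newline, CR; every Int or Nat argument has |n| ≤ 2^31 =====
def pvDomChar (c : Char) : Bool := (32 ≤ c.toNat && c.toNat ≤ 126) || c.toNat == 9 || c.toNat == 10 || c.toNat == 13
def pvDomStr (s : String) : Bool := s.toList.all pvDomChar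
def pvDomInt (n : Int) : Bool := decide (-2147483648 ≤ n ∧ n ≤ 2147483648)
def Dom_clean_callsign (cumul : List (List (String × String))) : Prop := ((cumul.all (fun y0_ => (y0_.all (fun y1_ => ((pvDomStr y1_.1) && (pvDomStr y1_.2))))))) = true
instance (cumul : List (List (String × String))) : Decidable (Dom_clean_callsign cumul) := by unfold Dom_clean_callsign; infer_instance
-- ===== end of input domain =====

-- B replaces A's delete-and-rewind while loop (quadratic tail shifting) with a one-pass
-- two-pointer in-place compaction plus one tail truncation; both A and B mutate the input
-- list in place and return the same object, so the in-place side effect is unchanged.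

-- shared by both ports: the Python test `d.keys() == {"timestamp", "icao24", "callsign"}`
-- (dict-keys view compared with a set literal = set equality)
def pvIsTarget (d : List (String × String)) : Bool :=
  PySem.Set.equal (PySem.Set.ofList (d.map Prod.fst))
    (PySem.Set.ofList ["timestamp", "icao24", "callsign"])

-- ===== PORT A =====
-- the while loop: `del cumul[i]; i -= 1` followed by `i += 1` leaves i unchanged on a hit
def cleanLoopA (cumul : List (List (String × String))) (i : Nat) :
    List (List (String × String)) :=
  if h : i < cumul.length then
    if pvIsTarget cumul[i] then cleanLoopA (cumul.eraseIdx i) i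
    else cleanLoopA cumul (i + 1)
  else cumul
termination_by cumul.length - i
decreasing_by
  all_goals try simp only [List.length_eraseIdx]
  all_goals try split
  all_goals omega

def clean_callsign (cumul : List (List (String × String))) : List (List (String × String)) :=
  cleanLoopA cumul 0

-- ===== PORT B =====
-- B's fold step
def pvStepB (st : List (List (String × String)) × Int) (r : Int) :
    List (List (String × String)) × Int :=
  let d := PySem.List.pyGetD st.1 r []
  if pvIsTarget d then st
  else (PySem.List.pySetD st.1 st.2 d, st.2 + 1)

def clean_callsign_alt (cumul : List (List (String × String))) : List (List (String × String)) :=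
  let st := (PySem.List.pyRange 0 (cumul.length : Int) 1).foldl pvStepB (cumul, 0)
  st.1.take st.2.toNat      -- del cumul[w:]

-- ===== PRECONDITION & SPEC =====
def Spec_clean_callsign (cumul : List (List (String × String))) (out : List (List (String × String))) : Prop := out = clean_callsign_alt cumul
instance (cumul : List (List (String × String))) (out : List (List (String × String))) : Decidable (Spec_clean_callsign cumul out) := by unfold Spec_clean_callsign; infer_instance

-- ===== CLAIM (what is proved, stated in full; the proofs are below) =====
def Claim_equal_clean_callsign : Prop := ∀ (cumul : List (List (String × String))), Dom_clean_callsign cumul → Spec_clean_callsign cumul (clean_callsign cumul)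

-- ===== LEMMAS AND PROOFS =====

-- A's loop keeps the first i elements and filters the rest
theorem cleanLoopA_eq_filter (cumul : List (List (String × String))) (i : Nat) :
    cleanLoopA cumul i =
      cumul.take i ++ (cumul.drop i).filter (fun d => !pvIsTarget d) := by
  rw [cleanLoopA]
  split
  · rename_i h
    split
    · rename_i ht
      rw [cleanLoopA_eq_filter (cumul.eraseIdx i) i, List.eraseIdx_eq_take_drop_succ]
      have hlen : (cumul.take i).length = i := by simp; omega
      rw [List.take_append, List.drop_append, hlen]
      simp only [Nat.sub_self, List.take_zero, List.append_nil, List.drop_zero]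
      rw [List.take_of_length_le (le_of_eq hlen), List.drop_of_length_le (le_of_eq hlen)]
      rw [List.drop_eq_getElem_cons h, List.filter_cons]
      simp [ht]
    · rename_i ht
      rw [cleanLoopA_eq_filter cumul (i + 1), List.take_succ_eq_append_getElem h,
        List.append_assoc, List.singleton_append]
      conv_rhs => rw [List.drop_eq_getElem_cons h]
      rw [List.filter_cons]
      simp [ht]
  · rename_i h
    have : cumul.length ≤ i := by omega
    simp [List.take_of_length_le this, List.drop_of_length_le this]
termination_by cumul.length - i
decreasing_by
  all_goals try simp only [List.length_eraseIdx]
  all_goals try split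
  all_goals omega

theorem clean_callsign_eq_filter (cumul : List (List (String × String))) :
    clean_callsign cumul = cumul.filter (fun d => !pvIsTarget d) := by
  rw [clean_callsign, cleanLoopA_eq_filter]; simp

-- invariant of B's compaction loop after processing the first r indices
theorem pvLoopB_inv (cumul : List (List (String × String))) (r : Nat)
    (hr : r ≤ cumul.length) :
    let st := (PySem.List.pyRange 0 (r : Int) 1).foldl pvStepB (cumul, 0)
    st.1.length = cumul.length ∧
    st.2 = (((cumul.take r).filter (fun d => !pvIsTarget d)).length : Int) ∧
    st.1.take st.2.toNat = (cumul.take r).filter (fun d => !pvIsTarget d) ∧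
    st.1.drop r = cumul.drop r := by
  induction r with
  | zero => simp
  | succ r ih =>
    have hr' : r ≤ cumul.length := by omega
    obtain ⟨h1, h2, h3, h4⟩ := ih hr'
    have hcast : ((r + 1 : Nat) : Int) = (r : Int) + 1 := by push_cast; ring
    rw [hcast, PySem.List.pyRange_one_succ_right (by positivity), List.foldl_append]
    set st := (PySem.List.pyRange 0 (r : Int) 1).foldl pvStepB (cumul, 0) with hst
    simp only [List.foldl_cons, List.foldl_nil]
    have hrlt : r < cumul.length := by omega
    have hrlt' : r < st.1.length := by omega
    -- the element read at index r is the original cumul[r]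
    have hg1 : st.1[r] = cumul[r] := by
      have e : (st.1.drop r)[0]'(by simp; omega) = (cumul.drop r)[0]'(by simp; omega) := by
        simp only [h4]
      simpa using e
    have hget : PySem.List.pyGetD st.1 (r : Int) [] = cumul[r] := by
      rw [PySem.List.pyGetD_natCast]
      simp [List.getD_eq_getElem?_getD, List.getElem?_eq_getElem hrlt', hg1]
    -- w bounds
    have hfl := List.length_filter_le (fun d => !pvIsTarget d) (cumul.take r)
    have hlt0 : (cumul.take r).length = r := by simp; omega
    have hwle : st.2.toNat ≤ r := by omega
    have hwnn : 0 ≤ st.2 := by rw [h2]; positivity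
    have htake : cumul.take (r + 1) = cumul.take r ++ [cumul[r]] :=
      List.take_succ_eq_append_getElem hrlt
    unfold pvStepB
    rw [hget]
    by_cases hT : pvIsTarget cumul[r] = true
    · rw [if_pos hT]
      refine ⟨h1, ?_, ?_, ?_⟩
      · rw [htake, List.filter_append, List.filter_cons]
        simp [hT, h2]
      · rw [h3, htake, List.filter_append, List.filter_cons]; simp [hT]
      · rw [← List.drop_drop, h4, List.drop_drop]
    · rw [if_neg hT]
      have hwlt : st.2.toNat < st.1.length := by omega
      rw [PySem.List.pySetD_of_nonneg _ _ hwnn]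
      have hset : st.1.set st.2.toNat cumul[r] =
          st.1.take st.2.toNat ++ cumul[r] :: st.1.drop (st.2.toNat + 1) := by
        rw [List.set_eq_take_append_cons_drop, if_pos hwlt]
      refine ⟨by simp [h1], ?_, ?_, ?_⟩
      · rw [htake, List.filter_append, List.filter_cons]
        simp only [hT, Bool.not_false, if_true]
        simp [h2]
      · have h2' : (st.2 + 1).toNat = st.2.toNat + 1 := by omega
        rw [h2', hset, List.take_append]
        have hmin : min (st.2.toNat + 1) st.2.toNat = st.2.toNat := by omega
        rw [htake, List.filter_append, List.filter_cons]
        simp only [hT, Bool.not_false, if_true, h3]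
        have hF : (List.filter (fun d => !pvIsTarget d) (List.take r cumul)).length
            = st.2.toNat := by omega
        rw [List.take_of_length_le (by omega), hF]
        simp
      · rw [hset]
        have hlt2 : (st.1.take st.2.toNat).length = st.2.toNat := by simp; omega
        rw [List.drop_append, hlt2]
        have : st.2.toNat - (r + 1) = 0 := by omega
        rw [List.drop_of_length_le (by rw [hlt2]; omega)]
        simp only [List.nil_append]
        have hw1 : r + 1 - st.2.toNat = (r - st.2.toNat) + 1 := by omega
        rw [hw1, List.drop_succ_cons, List.drop_drop]
        have : st.2.toNat + 1 + (r - st.2.toNat) = r + 1 := by omega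
        rw [this, ← List.drop_drop, h4, List.drop_drop]

theorem clean_callsign_alt_eq_filter (cumul : List (List (String × String))) :
    clean_callsign_alt cumul = cumul.filter (fun d => !pvIsTarget d) := by
  have := pvLoopB_inv cumul cumul.length (le_refl _)
  obtain ⟨h1, h2, h3, h4⟩ := this
  unfold clean_callsign_alt
  simpa using h3

-- ===== VERDICT (by name: the statement is the Claim_ definition above) =====
theorem clean_callsign_spec : Claim_equal_clean_callsign := by
  intro cumul _
  unfold Spec_clean_callsign
  rw [clean_callsign_eq_filter, clean_callsign_alt_eq_filter]
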